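-- pv_equiv track=rewrite | github.com/ogunsolahabib/ex_py | pig_latin.py | get_cons_before_first_vowel
-- ===== SOURCE A (Python) =====
-- VOWELS= ["a", "e", "i", "o", "u"]
--
-- def get_cons_before_first_vowel(text):
--      # find first vowel
--     first_vowel = 0
--     for x in text:
--         if x not in VOWELS:
--             first_vowel += 1
--         else:
--             break
--
--     return text[0:first_vowel]
-- ===== SOURCE B (Python) =====
-- VOWELS = ["a", "e", "i", "o", "u"]
--
-- def get_cons_before_first_vowel(text):
--     # position of each vowel's first occurrence (str.find scans per vowel);
--     # the earliest one bounds the consonant prefix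
--     hits = [p for p in (text.find(v) for v in VOWELS) if p != -1]
--     return text[:min(hits)] if hits else text[:]
-- ===== Notes on version B (the rewrite author's own statement) =====
-- stated objective: alternative
-- what changed: B replaces A's single character-by-character counting loop (and slice by the counted index) with one str.find per vowel plus a min over the hit positions, so the scanning is done by five substring searches instead of one Python-level character loop.
import Mathlib
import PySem

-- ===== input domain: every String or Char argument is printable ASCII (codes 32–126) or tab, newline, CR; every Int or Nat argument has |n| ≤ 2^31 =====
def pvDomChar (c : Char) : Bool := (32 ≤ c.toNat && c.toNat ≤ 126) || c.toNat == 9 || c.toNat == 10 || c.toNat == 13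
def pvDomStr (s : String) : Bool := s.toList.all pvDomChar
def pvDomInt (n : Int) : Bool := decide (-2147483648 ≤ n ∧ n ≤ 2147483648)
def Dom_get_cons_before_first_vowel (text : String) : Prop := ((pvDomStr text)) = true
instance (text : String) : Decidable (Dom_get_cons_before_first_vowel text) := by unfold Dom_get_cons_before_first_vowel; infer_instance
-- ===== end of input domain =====

-- B replaces A's single counting scan by one str.find per vowel and a min of the hit
-- positions (objective: alternative; return value only — both are pure on strings).

-- ===== PORT A =====
-- VOWELS = ["a","e","i","o","u"]; the loop variable x is a 1-character string in
-- Python, ported as the character itself (membership in the vowel characters is exact).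
def pvVowelChars : List Char := ['a', 'e', 'i', 'o', 'u']

-- for x in text: if x not in VOWELS: first_vowel += 1 else: break
def pvLoopA : List Char → Nat → Nat
  | [], first_vowel => first_vowel
  | x :: rest, first_vowel =>
      if x ∉ pvVowelChars then pvLoopA rest (first_vowel + 1)
      else first_vowel

def get_cons_before_first_vowel (text : String) : String :=
  let first_vowel := pvLoopA text.toList 0
  PySem.Str.slice text (some 0) (some (first_vowel : Int))

-- ===== PORT B =====
def pvVOWELS : List String := ["a", "e", "i", "o", "u"]

def get_cons_before_first_vowel_alt (text : String) : String :=
  let hits := (pvVOWELS.map (fun v => PySem.Chars.find text.toList v.toList)).filter (fun p => p != -1)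
  match PySem.List.min? hits id with
  | some m => PySem.Str.slice text none (some m)
  | none => PySem.Str.slice text none none

-- ===== PRECONDITION & SPEC =====
def Spec_get_cons_before_first_vowel (text : String) (out : String) : Prop := out = get_cons_before_first_vowel_alt text
instance (text : String) (out : String) : Decidable (Spec_get_cons_before_first_vowel text out) := by unfold Spec_get_cons_before_first_vowel; infer_instance

-- ===== CLAIM (what is proved, stated in full; the proofs are below) =====
def Claim_equal_get_cons_before_first_vowel : Prop := ∀ (text : String), Dom_get_cons_before_first_vowel text → Spec_get_cons_before_first_vowel text (get_cons_before_first_vowel text)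

-- ===== LEMMAS AND PROOFS =====

-- length of the consonant prefix
def pvFw (cs : List Char) : Nat := (cs.takeWhile (fun c => !decide (c ∈ pvVowelChars))).length

theorem pvLoopA_eq (cs : List Char) (k : Nat) : pvLoopA cs k = k + pvFw cs := by
  induction cs generalizing k with
  | nil => simp [pvLoopA, pvFw]
  | cons x rest ih =>
      by_cases hx : x ∈ pvVowelChars
      · simp [pvLoopA, pvFw, hx, List.takeWhile]
      · simp only [pvLoopA, pvFw, List.takeWhile] at *
        simp [hx, ih]
        omega

-- str.find for a single-character needle
theorem pvFindGo_single (c : Char) (cs : List Char) (k : Nat) :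
    PySem.Chars.find.go [c] cs k =
      if c ∈ cs then ((k + (cs.takeWhile (fun x => x != c)).length : Nat) : Int) else -1 := by
  induction cs generalizing k with
  | nil => simp [PySem.Chars.find.go]
  | cons x rest ih =>
      by_cases hx : x = c
      · subst hx
        simp [PySem.Chars.find.go, List.isPrefixOf, List.takeWhile]
      · have : ([c].isPrefixOf (x :: rest)) = false := by
          simp [List.isPrefixOf]; exact fun h => absurd h.symm hx
        have hxc : (x != c) = true := by simp [hx]
        simp only [PySem.Chars.find.go, this, Bool.false_eq_true, if_false, ih]
        simp only [List.mem_cons, List.takeWhile, hxc]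
        have hcx : ¬ (c = x) := fun h => hx h.symm
        simp only [hcx, false_or]
        split
        · push_cast; simp; omega
        · rfl

theorem pvFind_single (c : Char) (cs : List Char) :
    PySem.Chars.find cs [c] =
      if c ∈ cs then (((cs.takeWhile (fun x => x != c)).length : Nat) : Int) else -1 := by
  simpa using pvFindGo_single c cs 0

-- the consonant prefix is at most the prefix before any given vowel
theorem pvFw_le (c : Char) (hc : c ∈ pvVowelChars) (cs : List Char) :
    pvFw cs ≤ (cs.takeWhile (fun x => x != c)).length := by
  induction cs with
  | nil => simp [pvFw]
  | cons x rest ih =>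
      by_cases hx : x ∈ pvVowelChars
      · simp [pvFw, List.takeWhile, hx]
      · have hxc : (x != c) = true := by
          simp only [bne_iff_ne, ne_eq]
          intro h; subst h; exact hx hc
        have hih := ih
        unfold pvFw at hih ⊢
        simp only [List.takeWhile, hxc]
        simp [hx]
        omega

-- if some vowel occurs, some vowel's prefix length is exactly the consonant prefix length
theorem pvFw_exists (cs : List Char) (h : ∃ c, c ∈ pvVowelChars ∧ c ∈ cs) :
    ∃ c, c ∈ pvVowelChars ∧ c ∈ cs ∧ (cs.takeWhile (fun x => x != c)).length = pvFw cs := by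
  induction cs with
  | nil => obtain ⟨c, _, hc⟩ := h; simp at hc
  | cons x rest ih =>
      by_cases hx : x ∈ pvVowelChars
      · exact ⟨x, hx, List.mem_cons_self,
          by simp [pvFw, List.takeWhile, hx]⟩
      · obtain ⟨c, hcv, hcs⟩ := h
        have hcr : c ∈ rest := by
          rcases List.mem_cons.mp hcs with h1 | h1
          · exact absurd (h1 ▸ hcv) hx
          · exact h1
        obtain ⟨c', hc'v, hc'r, hlen⟩ := ih ⟨c, hcv, hcr⟩
        have hxc : (x != c') = true := by
          simp only [bne_iff_ne, ne_eq]
          intro h; subst h; exact hx hc'v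
        refine ⟨c', hc'v, List.mem_cons_of_mem _ hc'r, ?_⟩
        have hih := hlen
        unfold pvFw at hih ⊢
        simp only [List.takeWhile, hxc]
        simp [hx]
        omega

-- no vowel occurs → the whole string is the consonant prefix
theorem pvFw_all (cs : List Char) (h : ∀ c, c ∈ pvVowelChars → c ∉ cs) :
    pvFw cs = cs.length := by
  unfold pvFw
  rw [List.takeWhile_eq_self_iff.mpr]
  intro x hx
  simpa using fun hc => h x hc hx

-- membership in B's hit list
theorem pvMem_hits (text : String) (p : Int) :
    p ∈ (pvVOWELS.map (fun v => PySem.Chars.find text.toList v.toList)).filter (fun p => p != -1) ↔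
      (∃ c, c ∈ pvVowelChars ∧ PySem.Chars.find text.toList [c] = p) ∧ p ≠ -1 := by
  constructor
  · intro hp
    have := List.mem_filter.mp hp
    obtain ⟨v, hv, hfind⟩ := List.mem_map.mp this.1
    have hne : p ≠ -1 := by simpa using this.2
    refine ⟨?_, hne⟩
    fin_cases hv
    · exact ⟨'a', by decide, by simpa using hfind⟩
    · exact ⟨'e', by decide, by simpa using hfind⟩
    · exact ⟨'i', by decide, by simpa using hfind⟩
    · exact ⟨'o', by decide, by simpa using hfind⟩
    · exact ⟨'u', by decide, by simpa using hfind⟩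
  · rintro ⟨⟨c, hcv, hfind⟩, hne⟩
    refine List.mem_filter.mpr ⟨List.mem_map.mpr ⟨String.ofList [c], ?_, ?_⟩, by simpa using hne⟩
    · fin_cases hcv <;> decide
    · simpa using hfind

theorem get_cons_A (text : String) :
    get_cons_before_first_vowel text = String.ofList (text.toList.take (pvFw text.toList)) := by
  unfold get_cons_before_first_vowel
  rw [pvLoopA_eq]
  simp [PySem.Str.slice, PySem.Chars.slice,
    PySem.List.slice_toNat _ (by omega : (0:Int) ≤ 0) (Int.natCast_nonneg _)]

-- ===== VERDICT (by name: the statement is the Claim_ definition above) =====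
theorem get_cons_before_first_vowel_spec : Claim_equal_get_cons_before_first_vowel := by
  intro text _
  unfold Spec_get_cons_before_first_vowel get_cons_before_first_vowel_alt
  dsimp only
  rw [get_cons_A]
  by_cases hvow : ∃ c, c ∈ pvVowelChars ∧ c ∈ text.toList
  · -- some vowel occurs: the min of the hits is exactly pvFw text.toList
    obtain ⟨c0, hc0v, hc0cs, hlen⟩ := pvFw_exists text.toList hvow
    have hfw_mem : ((pvFw text.toList : Nat) : Int) ∈
        (pvVOWELS.map (fun v => PySem.Chars.find text.toList v.toList)).filter (fun p => p != -1) := by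
      refine (pvMem_hits text _).mpr ⟨⟨c0, hc0v, ?_⟩, by omega⟩
      rw [pvFind_single, if_pos hc0cs, hlen]
    cases hmin : PySem.List.min? ((pvVOWELS.map (fun v => PySem.Chars.find text.toList v.toList)).filter (fun p => p != -1)) id with
    | none =>
        rw [PySem.List.min?_eq_none_iff] at hmin
        rw [hmin] at hfw_mem
        simp at hfw_mem
    | some m =>
        have hm_mem := PySem.List.min?_mem hmin
        obtain ⟨⟨c, hcv, hfind⟩, hne⟩ := (pvMem_hits text m).mp hm_mem
        have hle : m ≤ ((pvFw text.toList : Nat) : Int) := PySem.List.min?_isMin hmin _ hfw_mem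
        have hge : ((pvFw text.toList : Nat) : Int) ≤ m := by
          rw [pvFind_single] at hfind
          by_cases hc : c ∈ text.toList
          · rw [if_pos hc] at hfind
            have := pvFw_le c hcv text.toList
            omega
          · rw [if_neg hc] at hfind
            exact absurd hfind.symm hne
        have hm : m = ((pvFw text.toList : Nat) : Int) := le_antisymm hle hge
        subst hm
        simp only [PySem.Str.slice, PySem.Chars.slice]
        rw [PySem.List.slice_to _ (Int.natCast_nonneg _)]
        simp
  · -- no vowel: every find misses, the hit list is empty, both sides are the whole string
    simp only [not_exists, not_and] at hvow
    have hempty : (pvVOWELS.map (fun v => PySem.Chars.find text.toList v.toList)).filter (fun p => p != -1) = [] := by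
      rw [List.eq_nil_iff_forall_not_mem]
      intro p hp
      obtain ⟨⟨c, hcv, hfind⟩, hne⟩ := (pvMem_hits text p).mp hp
      rw [pvFind_single, if_neg (hvow c hcv)] at hfind
      exact hne hfind.symm
    rw [hempty]
    simp only [PySem.List.min?, List.foldl_nil]
    rw [pvFw_all text.toList hvow, List.take_length]
    simp [PySem.Str.slice, PySem.Chars.slice, pysem]
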